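-- pv_equiv track=rewrite | github.com/ObEngine/Obidog | obeldog/generators/bindings_generator.py | generate_constructors_definitions
-- ===== SOURCE A (Python) =====
-- def generate_constructors_definitions(constructors):
--     """This method generates all possible combinations for all constructors of a class
--     If a function has 2 mandatory parameters and 3 default ones, it will generate 4 constructor
--     definitions
--     """
--     constructors_definitions = []
--     for constructor in constructors:
--         constructor_definitions = []
--         static_part_index = 0
--         for parameter in constructor["parameters"]:
--             if "default" in parameter:
--                 break
--             static_part_index += 1
--         static_part = [
--             parameter["type"]
--             for parameter in constructor["parameters"][0:static_part_index]
--         ]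
--         constructor_definitions.append(static_part)
--         for i in range(static_part_index, len(constructor["parameters"])):
--             constructor_definitions.append(
--                 static_part
--                 + [
--                     parameter["type"]
--                     for parameter in constructor["parameters"][
--                         static_part_index : i + 1
--                     ]
--                 ]
--             )
--         constructors_definitions.append(constructor_definitions)
--     return constructors_definitions
-- ===== SOURCE B (Python) =====
-- def generate_constructors_definitions(constructors):
--     """Single streaming pass per constructor: walk the parameters once, growing the
--     current type prefix; the moment the first defaulted parameter is seen, start the
--     definitions list with the prefix so far, and from then on record every grown
--     prefix. No default at all means exactly one full-length definition."""
--     result = []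
--     for constructor in constructors:
--         prefix = []
--         defs = None
--         for parameter in constructor["parameters"]:
--             if defs is None and "default" in parameter:
--                 defs = [prefix]
--             prefix = prefix + [parameter["type"]]
--             if defs is not None:
--                 defs.append(prefix)
--         result.append(defs if defs is not None else [prefix])
--     return result
-- ===== Notes on version B (the rewrite author's own statement) =====
-- stated objective: alternative
-- what changed: B replaces A's two-stage construction (first scan for the static index, then slice the parameter list repeatedly to build static-part-plus-suffix concatenations) by one streaming pass per constructor that grows the current prefix parameter by parameter and starts recording prefixes the moment the first defaulted parameter appears, so no index, no slicing and no second scan exist.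
import Mathlib
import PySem

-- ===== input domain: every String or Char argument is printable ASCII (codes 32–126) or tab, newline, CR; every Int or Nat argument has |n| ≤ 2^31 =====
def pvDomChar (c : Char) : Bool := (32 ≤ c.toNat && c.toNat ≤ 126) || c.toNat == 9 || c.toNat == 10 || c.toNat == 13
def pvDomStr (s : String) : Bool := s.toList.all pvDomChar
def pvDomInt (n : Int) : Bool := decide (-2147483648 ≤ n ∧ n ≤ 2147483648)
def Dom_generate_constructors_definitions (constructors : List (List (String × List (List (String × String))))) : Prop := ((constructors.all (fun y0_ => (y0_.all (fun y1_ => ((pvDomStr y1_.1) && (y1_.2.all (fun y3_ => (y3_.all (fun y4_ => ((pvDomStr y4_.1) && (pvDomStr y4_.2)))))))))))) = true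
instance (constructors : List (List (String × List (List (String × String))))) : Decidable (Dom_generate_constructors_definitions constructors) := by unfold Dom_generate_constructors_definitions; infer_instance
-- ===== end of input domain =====

-- B makes one streaming pass per constructor (grow the prefix, start recording at the
-- first defaulted parameter) instead of A's static-index scan plus repeated slicing
-- (objective: alternative).


-- shared dict-access primitive: Python `d[k]` / `k in d` on an insertion-ordered
-- association list (first match), exact
def pvLookup {α : Type} (d : List (String × α)) (k : String) : Option α :=
  match d with
  | [] => none
  | (k', v) :: rest => if k' == k then some v else pvLookup rest k

-- ===== PORT A =====
-- loop `for parameter in …: if "default" in parameter: break; static_part_index += 1`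
def aStaticIndex : List (List (String × String)) → Nat
  | [] => 0
  | p :: rest => if (pvLookup p "default").isSome then 0 else aStaticIndex rest + 1

-- parameter["type"]; the .getD "" is unreachable under Pre_ (KeyError excluded)
def aType (p : List (String × String)) : String := (pvLookup p "type").getD ""

-- body of A's outer loop for one constructor
def aConstructor (c : List (String × List (List (String × String)))) : List (List String) :=
  let params := (pvLookup c "parameters").getD []
  let spi := aStaticIndex params
  let static_part := (PySem.List.slice params (some 0) (some (spi : Int))).map aType
  (PySem.List.pyRange (spi : Int) (params.length : Int) 1).foldl
    (fun acc i =>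
      acc ++ [static_part ++ (PySem.List.slice params (some (spi : Int)) (some (i + 1))).map aType])
    [static_part]

def generate_constructors_definitions (constructors : List (List (String × List (List (String × String))))) : List (List (List String)) :=
  constructors.foldl (fun acc c => acc ++ [aConstructor c]) []

-- ===== PORT B =====
-- one step of B's inner streaming loop: state = (current prefix, defs or None)
def bStep (s : List String × Option (List (List String))) (p : List (String × String)) :
    List String × Option (List (List String)) :=
  let defs := if s.2.isNone && (pvLookup p "default").isSome then some [s.1] else s.2
  let pre := s.1 ++ [(pvLookup p "type").getD ""]
  (pre, defs.map (fun d => d ++ [pre]))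

def bConstructor (c : List (String × List (List (String × String)))) : List (List String) :=
  let st := ((pvLookup c "parameters").getD []).foldl bStep ([], none)
  match st.2 with
  | some d => d
  | none => [st.1]

def generate_constructors_definitions_alt (constructors : List (List (String × List (List (String × String))))) : List (List (List String)) :=
  constructors.map bConstructor

-- ===== PRECONDITION & SPEC =====
-- Pre_ excludes exactly the inputs on which Python A raises KeyError: a constructor
-- without a "parameters" key, or a parameter without a "type" key (B raises there too).
-- (pvLookup here is not a re-simulation of the algorithm: it is the first-match
-- association-list lookup, i.e. the closed-form statement "the dict has this key".)
def Pre_generate_constructors_definitions (constructors : List (List (String × List (List (String × String))))) : Prop :=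
  ∀ c ∈ constructors, (pvLookup c "parameters").isSome ∧
    ∀ p ∈ (pvLookup c "parameters").getD [], (pvLookup p "type").isSome

instance (constructors : List (List (String × List (List (String × String))))) : Decidable (Pre_generate_constructors_definitions constructors) := by
  unfold Pre_generate_constructors_definitions; infer_instance

def pvWitness_generate_constructors_definitions : (List (List (String × List (List (String × String))))) :=
  [[("parameters", [[("type", "int")], [("type", "str"), ("default", "0")]])],
   [("parameters", [])]]

def Spec_generate_constructors_definitions (constructors : List (List (String × List (List (String × String))))) (out : List (List (List String))) : Prop := out = generate_constructors_definitions_alt constructors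
instance (constructors : List (List (String × List (List (String × String))))) (out : List (List (List String))) : Decidable (Spec_generate_constructors_definitions constructors out) := by unfold Spec_generate_constructors_definitions; infer_instance

-- ===== CLAIM (what is proved, stated in full; the proofs are below) =====
def Claim_equal_generate_constructors_definitions : Prop := ∀ (constructors : List (List (String × List (List (String × String))))), Dom_generate_constructors_definitions constructors → Pre_generate_constructors_definitions constructors → Spec_generate_constructors_definitions constructors (generate_constructors_definitions constructors)

-- ===== LEMMAS AND PROOFS =====

-- common characterisation both ports are reduced to: prefixes of the type list of
-- lengths s, s+1, …, n (written in A's head-plus-range shape)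
def specDefs (s : Nat) (types : List String) : List (List String) :=
  types.take s :: (List.range (types.length - s)).map (fun k => types.take (s + k + 1))

theorem foldl_snoc {α β : Type} (g : α → β) (l : List α) (init : List β) :
    l.foldl (fun acc x => acc ++ [g x]) init = init ++ l.map g := by
  induction l generalizing init with
  | nil => simp
  | cons x xs ih => simp [List.foldl_cons, ih]

theorem aStaticIndex_le (l : List (List (String × String))) : aStaticIndex l ≤ l.length := by
  induction l with
  | nil => simp [aStaticIndex]
  | cons p rest ih =>
    simp only [aStaticIndex, List.length_cons]
    split <;> omega

-- A's inner computation equals specDefs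
theorem aBody_eq (params : List (List (String × String))) :
    (PySem.List.pyRange ((aStaticIndex params : Nat) : Int) (params.length : Int) 1).foldl
      (fun acc i =>
        acc ++ [(PySem.List.slice params (some 0) (some ((aStaticIndex params : Nat) : Int))).map aType
          ++ (PySem.List.slice params (some ((aStaticIndex params : Nat) : Int)) (some (i + 1))).map aType])
      [(PySem.List.slice params (some 0) (some ((aStaticIndex params : Nat) : Int))).map aType]
    = specDefs (aStaticIndex params) (params.map aType) := by
  unfold specDefs
  set s := aStaticIndex params with hs
  have hsle : s ≤ params.length := aStaticIndex_le params
  set types := params.map aType with htypes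
  have hlen : types.length = params.length := by simp [htypes]
  have hstatic : (PySem.List.slice params (some 0) (some (s : Int))).map aType = types.take s := by
    have h0 : ((0 : Nat) : Int) = (0 : Int) := rfl
    rw [← h0, PySem.List.slice_natCast]
    simp only [List.drop_zero, Nat.sub_zero, List.map_take, ← htypes]
  rw [hstatic]
  rw [PySem.List.pyRange_one (s : Int) (params.length : Int)]
  have hns : ((params.length : Int) - (s : Int)).toNat = params.length - s := by omega
  rw [hns, List.foldl_map, foldl_snoc]
  rw [hlen]
  simp only [List.singleton_append]
  congr 1
  apply List.map_congr_left
  intro k hk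
  have h1 : (s : Int) + (k : Int) + 1 = (s : Int) + (((k + 1 : Nat)) : Int) := by push_cast; ring
  rw [h1, PySem.List.slice_natCast_add]
  simp only [List.map_take, List.map_drop, ← htypes]
  rw [← List.take_add]
  congr 1

theorem aConstructor_eq_spec (c : List (String × List (List (String × String)))) :
    aConstructor c = specDefs (aStaticIndex ((pvLookup c "parameters").getD []))
      (((pvLookup c "parameters").getD []).map aType) :=
  aBody_eq ((pvLookup c "parameters").getD [])

-- B's fold once defs is a list: every further parameter extends the prefix and
-- appends it
theorem bFoldl_some (l : List (List (String × String))) (pre : List String)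
    (ds : List (List String)) :
    l.foldl bStep (pre, some ds) =
      (pre ++ l.map aType,
       some (ds ++ (List.range l.length).map (fun k => pre ++ (l.map aType).take (k + 1)))) := by
  induction l generalizing pre ds with
  | nil => simp
  | cons p rest ih =>
    have hstep : bStep (pre, some ds) p
        = (pre ++ [aType p], some (ds ++ [pre ++ [aType p]])) := by
      simp [bStep, aType]
    rw [List.foldl_cons, hstep, ih]
    simp only [Prod.mk.injEq, Option.some.injEq, List.length_cons, List.map_cons]
    refine ⟨by simp, ?_⟩
    rw [List.range_succ_eq_map, List.append_assoc]
    simp only [List.singleton_append, List.map_cons, List.map_map]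
    congr 1
    congr 1
    · simp

-- B's fold while defs is still None, characterised by the static index
theorem bFoldl_none (l : List (List (String × String))) (pre : List String) :
    l.foldl bStep (pre, none) =
      (pre ++ l.map aType,
       if aStaticIndex l = l.length then none
       else some ((pre ++ (l.map aType).take (aStaticIndex l)) ::
         (List.range (l.length - aStaticIndex l)).map
           (fun k => pre ++ (l.map aType).take (aStaticIndex l + k + 1)))) := by
  induction l generalizing pre with
  | nil => simp [aStaticIndex]
  | cons p rest ih =>
    by_cases hd : (pvLookup p "default").isSome
    · have hstep : bStep (pre, none) p
          = (pre ++ [aType p], some [pre, pre ++ [aType p]]) := by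
        simp [bStep, aType, hd]
      rw [List.foldl_cons, hstep, bFoldl_some]
      have hsi : aStaticIndex (p :: rest) = 0 := by simp [aStaticIndex, hd]
      rw [hsi]
      simp only [List.length_cons, Nat.sub_zero]
      have hne : ¬ (0 = rest.length + 1) := by omega
      rw [if_neg hne]
      simp only [Prod.mk.injEq, Option.some.injEq, List.map_cons]
      refine ⟨by simp, ?_⟩
      rw [List.range_succ_eq_map]
      simp only [List.map_cons, List.map_map, List.cons_append, List.nil_append]
      congr 1
      · simp
      congr 1
      · simp [List.take_succ_cons]
    · have hstep : bStep (pre, none) p = (pre ++ [aType p], none) := by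
        simp [bStep, aType, hd]
      rw [List.foldl_cons, hstep, ih]
      have hsi : aStaticIndex (p :: rest) = aStaticIndex rest + 1 := by
        simp [aStaticIndex, hd]
      rw [hsi]
      by_cases hfull : aStaticIndex rest = rest.length
      · rw [if_pos hfull, if_pos (by simp [hfull])]
        simp
      · rw [if_neg hfull, if_neg (by simp; omega)]
        simp only [Prod.mk.injEq, Option.some.injEq, List.map_cons, List.length_cons]
        refine ⟨by simp, ?_⟩
        have hsub : rest.length + 1 - (aStaticIndex rest + 1) = rest.length - aStaticIndex rest := by omega
        rw [hsub]
        congr 1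
        · simp [List.take_succ_cons, List.append_assoc]
        · apply List.map_congr_left
          intro k _
          have h2 : aStaticIndex rest + 1 + k + 1 = (aStaticIndex rest + k + 1) + 1 := by omega
          rw [h2]
          simp [List.take_succ_cons, List.append_assoc]

theorem bConstructor_eq_spec (c : List (String × List (List (String × String)))) :
    bConstructor c = specDefs (aStaticIndex ((pvLookup c "parameters").getD []))
      (((pvLookup c "parameters").getD []).map aType) := by
  unfold bConstructor specDefs
  set params := (pvLookup c "parameters").getD [] with hp
  rw [bFoldl_none]
  by_cases hfull : aStaticIndex params = params.length
  · rw [if_pos hfull]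
    simp only []
    rw [hfull]
    simp [List.take_of_length_le]
  · rw [if_neg hfull]
    simp

-- ===== VERDICT (by name: the statement is the Claim_ definition above) =====
theorem generate_constructors_definitions_spec : Claim_equal_generate_constructors_definitions := by
  intro constructors _ _
  unfold Spec_generate_constructors_definitions generate_constructors_definitions
    generate_constructors_definitions_alt
  rw [foldl_snoc]
  simp only [List.nil_append]
  apply List.map_congr_left
  intro c _
  rw [aConstructor_eq_spec, bConstructor_eq_spec]
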